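-- pv_equiv track=rewrite | github.com/hi-its-lukas/NextDNS-Dashboard | app.py | classify_all_tech
-- ===== SOURCE A (Python) =====
-- GAFAM_DOMAINS = {
--     'google': [
--         'google', 'googleapis', 'gstatic', 'youtube', 'googlevideo', 'ggpht',
--         'googleusercontent', 'gvt1', 'gvt2', 'gvt3', 'doubleclick', 'googlesyndication',
--         'googleadservices', 'googleanalytics', 'googletag', 'googleoptimize',
--         'gmail', 'goog', 'chromium', 'android', 'blogger', 'blogspot',
--         'firebase', 'firebaseio', 'googlecloud', 'gcr.io', 'withgoogle',
--         'googleplex', 'googlezip', 'gmodules', 'feedburner', 'admob',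
--         'crashlytics', 'appspot', 'googledomains', 'google-analytics',
--         'ytimg', 'yt3.ggpht', 'youtu.be', 'youtube-nocookie'
--     ],
--     'apple': [
--         'apple', 'icloud', 'mzstatic', 'apple-cloudkit', 'cdn-apple',
--         'itunes', 'appstore', 'apple.news', 'apple.com', 'aaplimg',
--         'push.apple', 'siri', 'applemusic', 'icloud-content',
--         'me.com', 'mac.com', 'apple-dns', 'swcdn.apple', 'ls.apple',
--         'gs.apple', 'ess.apple', 'configuration.apple', 'certs.apple',
--         'valid.apple', 'ocsp.apple', 'captive.apple', 'airport.apple'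
--     ],
--     'meta': [
--         'facebook', 'fbcdn', 'instagram', 'whatsapp', 'fb.com', 'fb.me',
--         'meta', 'messenger', 'fbsbx', 'facebookcorewwwi', 'accountkit',
--         'oculus', 'workplace', 'fbpigeon', 'facebookmail', 'tfbnw',
--         'fburl', 'cdninstagram', 'threads.net', 'ig.me'
--     ],
--     'amazon': [
--         'amazon', 'amazonaws', 'cloudfront', 'alexa', 'prime',
--         'aws', 'awsstatic', 'elasticbeanstalk', 'elasticache',
--         'amazonvideo', 'amazonpay', 'primevideo', 'twitch', 'twitchcdn',
--         'twitchsvc', 'audible', 'goodreads', 'kindle', 'ring.com',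
--         'amazon-adsystem', 'amazonwebservices', 'awscdn', 's3.amazonaws',
--         'ec2.amazonaws', 'media-amazon', 'ssl-images-amazon', 'images-amazon',
--         'fls-na.amazon', 'unagi.amazon', 'device-metrics-us.amazon'
--     ],
--     'microsoft': [
--         'microsoft', 'msn', 'bing', 'azure', 'office', 'live', 'outlook',
--         'skype', 'xbox', 'windows', 'msftconnecttest', 'msedge',
--         'microsoftonline', 'office365', 'sharepoint', 'onedrive', 'onenote',
--         'linkedin', 'licdn', 'github', 'githubusercontent', 'githubassets',
--         'npmjs', 'visualstudio', 'vsassets', 'azureedge', 'trafficmanager',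
--         'windowsupdate', 'msauth', 'msftauth', 'msftstatic', 'msecnd',
--         'microsoftstore', 'ms-acdc', 'sfx.ms', 'aka.ms', 'gfx.ms',
--         'c.bing', 's.bing', 'login.live', 'login.microsoftonline',
--         'teams', 'skypeforbusiness', 'lync', 'yammer', 'dynamics',
--         'azure-dns', 'msocsp', 'digicert', 'verisign.net'
--     ]
-- }
--
-- OTHER_TECH_COMPANIES = {
--     'netflix': ['netflix', 'nflximg', 'nflxvideo', 'nflxext', 'nflxso'],
--     'spotify': ['spotify', 'scdn', 'spotifycdn', 'spotilocal'],
--     'tiktok': ['tiktok', 'tiktokcdn', 'bytedance', 'byteoversea', 'muscdn', 'musical.ly'],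
--     'twitter/x': ['twitter', 'twimg', 'x.com', 't.co', 'tweetdeck'],
--     'snapchat': ['snapchat', 'snapkit', 'snap.com', 'snapads'],
--     'adobe': ['adobe', 'typekit', 'adobecc', 'behance', 'adobelogin'],
--     'salesforce': ['salesforce', 'force.com', 'salesforceliveagent', 'sfdc'],
--     'oracle': ['oracle', 'oraclecloud', 'eloqua', 'bluekai', 'grapeshot'],
--     'ibm': ['ibm', 'bluemix', 'softlayer'],
--     'cloudflare': ['cloudflare', 'cloudflare-dns', 'cloudflareresolve', 'cf-ipfs'],
--     'akamai': ['akamai', 'akamaized', 'akamaihd', 'akadns', 'edgekey', 'edgesuite'],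
-- }
--
-- def classify_all_tech(domain):
--     if not domain:
--         return 'Others'
--     domain_lower = domain.lower()
--     for company, patterns in GAFAM_DOMAINS.items():
--         for pattern in patterns:
--             if pattern in domain_lower:
--                 return company.capitalize()
--     for company, patterns in OTHER_TECH_COMPANIES.items():
--         for pattern in patterns:
--             if pattern in domain_lower:
--                 return company.capitalize()
--     return 'Others'
-- ===== SOURCE B (Python) =====
-- # Flat priority table: A's scan order, one (pattern, label) entry per pattern.
-- _PATTERNS = [
--     ('google', 'Google'),
--     ('googleapis', 'Google'),
--     ('gstatic', 'Google'),
--     ('youtube', 'Google'),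
--     ('googlevideo', 'Google'),
--     ('ggpht', 'Google'),
--     ('googleusercontent', 'Google'),
--     ('gvt1', 'Google'),
--     ('gvt2', 'Google'),
--     ('gvt3', 'Google'),
--     ('doubleclick', 'Google'),
--     ('googlesyndication', 'Google'),
--     ('googleadservices', 'Google'),
--     ('googleanalytics', 'Google'),
--     ('googletag', 'Google'),
--     ('googleoptimize', 'Google'),
--     ('gmail', 'Google'),
--     ('goog', 'Google'),
--     ('chromium', 'Google'),
--     ('android', 'Google'),
--     ('blogger', 'Google'),
--     ('blogspot', 'Google'),
--     ('firebase', 'Google'),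
--     ('firebaseio', 'Google'),
--     ('googlecloud', 'Google'),
--     ('gcr.io', 'Google'),
--     ('withgoogle', 'Google'),
--     ('googleplex', 'Google'),
--     ('googlezip', 'Google'),
--     ('gmodules', 'Google'),
--     ('feedburner', 'Google'),
--     ('admob', 'Google'),
--     ('crashlytics', 'Google'),
--     ('appspot', 'Google'),
--     ('googledomains', 'Google'),
--     ('google-analytics', 'Google'),
--     ('ytimg', 'Google'),
--     ('yt3.ggpht', 'Google'),
--     ('youtu.be', 'Google'),
--     ('youtube-nocookie', 'Google'),
--     ('apple', 'Apple'),
--     ('icloud', 'Apple'),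
--     ('mzstatic', 'Apple'),
--     ('apple-cloudkit', 'Apple'),
--     ('cdn-apple', 'Apple'),
--     ('itunes', 'Apple'),
--     ('appstore', 'Apple'),
--     ('apple.news', 'Apple'),
--     ('apple.com', 'Apple'),
--     ('aaplimg', 'Apple'),
--     ('push.apple', 'Apple'),
--     ('siri', 'Apple'),
--     ('applemusic', 'Apple'),
--     ('icloud-content', 'Apple'),
--     ('me.com', 'Apple'),
--     ('mac.com', 'Apple'),
--     ('apple-dns', 'Apple'),
--     ('swcdn.apple', 'Apple'),
--     ('ls.apple', 'Apple'),
--     ('gs.apple', 'Apple'),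
--     ('ess.apple', 'Apple'),
--     ('configuration.apple', 'Apple'),
--     ('certs.apple', 'Apple'),
--     ('valid.apple', 'Apple'),
--     ('ocsp.apple', 'Apple'),
--     ('captive.apple', 'Apple'),
--     ('airport.apple', 'Apple'),
--     ('facebook', 'Meta'),
--     ('fbcdn', 'Meta'),
--     ('instagram', 'Meta'),
--     ('whatsapp', 'Meta'),
--     ('fb.com', 'Meta'),
--     ('fb.me', 'Meta'),
--     ('meta', 'Meta'),
--     ('messenger', 'Meta'),
--     ('fbsbx', 'Meta'),
--     ('facebookcorewwwi', 'Meta'),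
--     ('accountkit', 'Meta'),
--     ('oculus', 'Meta'),
--     ('workplace', 'Meta'),
--     ('fbpigeon', 'Meta'),
--     ('facebookmail', 'Meta'),
--     ('tfbnw', 'Meta'),
--     ('fburl', 'Meta'),
--     ('cdninstagram', 'Meta'),
--     ('threads.net', 'Meta'),
--     ('ig.me', 'Meta'),
--     ('amazon', 'Amazon'),
--     ('amazonaws', 'Amazon'),
--     ('cloudfront', 'Amazon'),
--     ('alexa', 'Amazon'),
--     ('prime', 'Amazon'),
--     ('aws', 'Amazon'),
--     ('awsstatic', 'Amazon'),
--     ('elasticbeanstalk', 'Amazon'),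
--     ('elasticache', 'Amazon'),
--     ('amazonvideo', 'Amazon'),
--     ('amazonpay', 'Amazon'),
--     ('primevideo', 'Amazon'),
--     ('twitch', 'Amazon'),
--     ('twitchcdn', 'Amazon'),
--     ('twitchsvc', 'Amazon'),
--     ('audible', 'Amazon'),
--     ('goodreads', 'Amazon'),
--     ('kindle', 'Amazon'),
--     ('ring.com', 'Amazon'),
--     ('amazon-adsystem', 'Amazon'),
--     ('amazonwebservices', 'Amazon'),
--     ('awscdn', 'Amazon'),
--     ('s3.amazonaws', 'Amazon'),
--     ('ec2.amazonaws', 'Amazon'),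
--     ('media-amazon', 'Amazon'),
--     ('ssl-images-amazon', 'Amazon'),
--     ('images-amazon', 'Amazon'),
--     ('fls-na.amazon', 'Amazon'),
--     ('unagi.amazon', 'Amazon'),
--     ('device-metrics-us.amazon', 'Amazon'),
--     ('microsoft', 'Microsoft'),
--     ('msn', 'Microsoft'),
--     ('bing', 'Microsoft'),
--     ('azure', 'Microsoft'),
--     ('office', 'Microsoft'),
--     ('live', 'Microsoft'),
--     ('outlook', 'Microsoft'),
--     ('skype', 'Microsoft'),
--     ('xbox', 'Microsoft'),
--     ('windows', 'Microsoft'),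
--     ('msftconnecttest', 'Microsoft'),
--     ('msedge', 'Microsoft'),
--     ('microsoftonline', 'Microsoft'),
--     ('office365', 'Microsoft'),
--     ('sharepoint', 'Microsoft'),
--     ('onedrive', 'Microsoft'),
--     ('onenote', 'Microsoft'),
--     ('linkedin', 'Microsoft'),
--     ('licdn', 'Microsoft'),
--     ('github', 'Microsoft'),
--     ('githubusercontent', 'Microsoft'),
--     ('githubassets', 'Microsoft'),
--     ('npmjs', 'Microsoft'),
--     ('visualstudio', 'Microsoft'),
--     ('vsassets', 'Microsoft'),
--     ('azureedge', 'Microsoft'),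
--     ('trafficmanager', 'Microsoft'),
--     ('windowsupdate', 'Microsoft'),
--     ('msauth', 'Microsoft'),
--     ('msftauth', 'Microsoft'),
--     ('msftstatic', 'Microsoft'),
--     ('msecnd', 'Microsoft'),
--     ('microsoftstore', 'Microsoft'),
--     ('ms-acdc', 'Microsoft'),
--     ('sfx.ms', 'Microsoft'),
--     ('aka.ms', 'Microsoft'),
--     ('gfx.ms', 'Microsoft'),
--     ('c.bing', 'Microsoft'),
--     ('s.bing', 'Microsoft'),
--     ('login.live', 'Microsoft'),
--     ('login.microsoftonline', 'Microsoft'),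
--     ('teams', 'Microsoft'),
--     ('skypeforbusiness', 'Microsoft'),
--     ('lync', 'Microsoft'),
--     ('yammer', 'Microsoft'),
--     ('dynamics', 'Microsoft'),
--     ('azure-dns', 'Microsoft'),
--     ('msocsp', 'Microsoft'),
--     ('digicert', 'Microsoft'),
--     ('verisign.net', 'Microsoft'),
--     ('netflix', 'Netflix'),
--     ('nflximg', 'Netflix'),
--     ('nflxvideo', 'Netflix'),
--     ('nflxext', 'Netflix'),
--     ('nflxso', 'Netflix'),
--     ('spotify', 'Spotify'),
--     ('scdn', 'Spotify'),
--     ('spotifycdn', 'Spotify'),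
--     ('spotilocal', 'Spotify'),
--     ('tiktok', 'Tiktok'),
--     ('tiktokcdn', 'Tiktok'),
--     ('bytedance', 'Tiktok'),
--     ('byteoversea', 'Tiktok'),
--     ('muscdn', 'Tiktok'),
--     ('musical.ly', 'Tiktok'),
--     ('twitter', 'Twitter/x'),
--     ('twimg', 'Twitter/x'),
--     ('x.com', 'Twitter/x'),
--     ('t.co', 'Twitter/x'),
--     ('tweetdeck', 'Twitter/x'),
--     ('snapchat', 'Snapchat'),
--     ('snapkit', 'Snapchat'),
--     ('snap.com', 'Snapchat'),
--     ('snapads', 'Snapchat'),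
--     ('adobe', 'Adobe'),
--     ('typekit', 'Adobe'),
--     ('adobecc', 'Adobe'),
--     ('behance', 'Adobe'),
--     ('adobelogin', 'Adobe'),
--     ('salesforce', 'Salesforce'),
--     ('force.com', 'Salesforce'),
--     ('salesforceliveagent', 'Salesforce'),
--     ('sfdc', 'Salesforce'),
--     ('oracle', 'Oracle'),
--     ('oraclecloud', 'Oracle'),
--     ('eloqua', 'Oracle'),
--     ('bluekai', 'Oracle'),
--     ('grapeshot', 'Oracle'),
--     ('ibm', 'Ibm'),
--     ('bluemix', 'Ibm'),
--     ('softlayer', 'Ibm'),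
--     ('cloudflare', 'Cloudflare'),
--     ('cloudflare-dns', 'Cloudflare'),
--     ('cloudflareresolve', 'Cloudflare'),
--     ('cf-ipfs', 'Cloudflare'),
--     ('akamai', 'Akamai'),
--     ('akamaized', 'Akamai'),
--     ('akamaihd', 'Akamai'),
--     ('akadns', 'Akamai'),
--     ('edgekey', 'Akamai'),
--     ('edgesuite', 'Akamai'),
-- ]
-- # Distinct pattern lengths: the substring index only needs these lengths.
-- _LENGTHS = sorted({len(p) for p, _ in _PATTERNS})
--
-- def classify_all_tech(domain):
--     dl = domain.lower()
--     # Index every substring of dl whose length can possibly match a pattern,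
--     # then answer each pattern by a single hash lookup instead of a scan of dl.
--     subs = set()
--     for L in _LENGTHS:
--         for i in range(len(dl)):
--             subs.add(dl[i:i + L])
--     return next((label for p, label in _PATTERNS if p in subs), 'Others')
-- ===== Notes on version B (the rewrite author's own statement) =====
-- stated objective: alternative
-- what changed: A scans the domain once per pattern through two nested dicts; B uses a flat precomputed (pattern, label) priority table plus distinct-length list, builds one hash set of all substrings of the lowered domain with a matching length, and returns the first table entry found in that set via a single lookup each.
import Mathlib
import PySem

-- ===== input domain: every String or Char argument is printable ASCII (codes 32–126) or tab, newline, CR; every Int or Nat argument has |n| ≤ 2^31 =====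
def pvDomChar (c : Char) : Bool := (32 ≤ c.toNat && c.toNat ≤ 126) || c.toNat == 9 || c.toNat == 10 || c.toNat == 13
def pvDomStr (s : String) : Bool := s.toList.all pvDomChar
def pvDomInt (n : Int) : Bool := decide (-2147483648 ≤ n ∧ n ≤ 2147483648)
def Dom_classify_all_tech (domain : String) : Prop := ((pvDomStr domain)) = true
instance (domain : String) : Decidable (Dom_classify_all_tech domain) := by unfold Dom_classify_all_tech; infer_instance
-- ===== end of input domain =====

-- B replaces A's per-pattern scans of the domain by a per-call hash index of the domain's
-- substrings (one set lookup per entry of a flat precomputed priority table); objective: alternative.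

-- ===== PORT A =====
-- module constants of A (nested dicts, as in the source)
def gafamDomains : List (String × List String) := [
  ("google", ["google", "googleapis", "gstatic", "youtube", "googlevideo", "ggpht",
    "googleusercontent", "gvt1", "gvt2", "gvt3", "doubleclick", "googlesyndication",
    "googleadservices", "googleanalytics", "googletag", "googleoptimize",
    "gmail", "goog", "chromium", "android", "blogger", "blogspot",
    "firebase", "firebaseio", "googlecloud", "gcr.io", "withgoogle",
    "googleplex", "googlezip", "gmodules", "feedburner", "admob",
    "crashlytics", "appspot", "googledomains", "google-analytics",
    "ytimg", "yt3.ggpht", "youtu.be", "youtube-nocookie"]),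
  ("apple", ["apple", "icloud", "mzstatic", "apple-cloudkit", "cdn-apple",
    "itunes", "appstore", "apple.news", "apple.com", "aaplimg",
    "push.apple", "siri", "applemusic", "icloud-content",
    "me.com", "mac.com", "apple-dns", "swcdn.apple", "ls.apple",
    "gs.apple", "ess.apple", "configuration.apple", "certs.apple",
    "valid.apple", "ocsp.apple", "captive.apple", "airport.apple"]),
  ("meta", ["facebook", "fbcdn", "instagram", "whatsapp", "fb.com", "fb.me",
    "meta", "messenger", "fbsbx", "facebookcorewwwi", "accountkit",
    "oculus", "workplace", "fbpigeon", "facebookmail", "tfbnw",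
    "fburl", "cdninstagram", "threads.net", "ig.me"]),
  ("amazon", ["amazon", "amazonaws", "cloudfront", "alexa", "prime",
    "aws", "awsstatic", "elasticbeanstalk", "elasticache",
    "amazonvideo", "amazonpay", "primevideo", "twitch", "twitchcdn",
    "twitchsvc", "audible", "goodreads", "kindle", "ring.com",
    "amazon-adsystem", "amazonwebservices", "awscdn", "s3.amazonaws",
    "ec2.amazonaws", "media-amazon", "ssl-images-amazon", "images-amazon",
    "fls-na.amazon", "unagi.amazon", "device-metrics-us.amazon"]),
  ("microsoft", ["microsoft", "msn", "bing", "azure", "office", "live", "outlook",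
    "skype", "xbox", "windows", "msftconnecttest", "msedge",
    "microsoftonline", "office365", "sharepoint", "onedrive", "onenote",
    "linkedin", "licdn", "github", "githubusercontent", "githubassets",
    "npmjs", "visualstudio", "vsassets", "azureedge", "trafficmanager",
    "windowsupdate", "msauth", "msftauth", "msftstatic", "msecnd",
    "microsoftstore", "ms-acdc", "sfx.ms", "aka.ms", "gfx.ms",
    "c.bing", "s.bing", "login.live", "login.microsoftonline",
    "teams", "skypeforbusiness", "lync", "yammer", "dynamics",
    "azure-dns", "msocsp", "digicert", "verisign.net"])]

def otherTechCompanies : List (String × List String) := [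
  ("netflix", ["netflix", "nflximg", "nflxvideo", "nflxext", "nflxso"]),
  ("spotify", ["spotify", "scdn", "spotifycdn", "spotilocal"]),
  ("tiktok", ["tiktok", "tiktokcdn", "bytedance", "byteoversea", "muscdn", "musical.ly"]),
  ("twitter/x", ["twitter", "twimg", "x.com", "t.co", "tweetdeck"]),
  ("snapchat", ["snapchat", "snapkit", "snap.com", "snapads"]),
  ("adobe", ["adobe", "typekit", "adobecc", "behance", "adobelogin"]),
  ("salesforce", ["salesforce", "force.com", "salesforceliveagent", "sfdc"]),
  ("oracle", ["oracle", "oraclecloud", "eloqua", "bluekai", "grapeshot"]),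
  ("ibm", ["ibm", "bluemix", "softlayer"]),
  ("cloudflare", ["cloudflare", "cloudflare-dns", "cloudflareresolve", "cf-ipfs"]),
  ("akamai", ["akamai", "akamaized", "akamaihd", "akadns", "edgekey", "edgesuite"])]

-- hand port of str.capitalize() (exact on ASCII: first char uppercased, rest lowercased)
def pyCapitalize (s : String) : String :=
  match s.toList with
  | [] => ""
  | c :: cs => String.ofList (PySem.Chars.upperChar c :: PySem.Chars.lower cs)

-- A's inner 'for pattern in patterns: if pattern in domain_lower: return company.capitalize()'
def scanPatsA (dl company : String) : List String → Option String
  | [] => none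
  | p :: ps => if PySem.Str.isIn p dl then some (pyCapitalize company) else scanPatsA dl company ps

-- A's outer 'for company, patterns in D.items(): …' with early return
def scanDictA (dl : String) : List (String × List String) → Option String
  | [] => none
  | (c, ps) :: rest =>
    match scanPatsA dl c ps with
    | some r => some r
    | none => scanDictA dl rest

def classify_all_tech (domain : String) : String :=
  if domain = "" then "Others"
  else
    let dl := PySem.Str.lower domain
    match scanDictA dl gafamDomains with
    | some r => r
    | none =>
      match scanDictA dl otherTechCompanies with
      | some r => r
      | none => "Others"

-- ===== PORT B =====
-- _PATTERNS: B's flat literal priority table, one (pattern, label) entry per pattern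
def patternsB : List (String × String) := [
  ("google", "Google"), ("googleapis", "Google"), ("gstatic", "Google"), ("youtube", "Google"),
  ("googlevideo", "Google"), ("ggpht", "Google"), ("googleusercontent", "Google"), ("gvt1", "Google"),
  ("gvt2", "Google"), ("gvt3", "Google"), ("doubleclick", "Google"), ("googlesyndication", "Google"),
  ("googleadservices", "Google"), ("googleanalytics", "Google"), ("googletag", "Google"), ("googleoptimize", "Google"),
  ("gmail", "Google"), ("goog", "Google"), ("chromium", "Google"), ("android", "Google"),
  ("blogger", "Google"), ("blogspot", "Google"), ("firebase", "Google"), ("firebaseio", "Google"),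
  ("googlecloud", "Google"), ("gcr.io", "Google"), ("withgoogle", "Google"), ("googleplex", "Google"),
  ("googlezip", "Google"), ("gmodules", "Google"), ("feedburner", "Google"), ("admob", "Google"),
  ("crashlytics", "Google"), ("appspot", "Google"), ("googledomains", "Google"), ("google-analytics", "Google"),
  ("ytimg", "Google"), ("yt3.ggpht", "Google"), ("youtu.be", "Google"), ("youtube-nocookie", "Google"),
  ("apple", "Apple"), ("icloud", "Apple"), ("mzstatic", "Apple"), ("apple-cloudkit", "Apple"),
  ("cdn-apple", "Apple"), ("itunes", "Apple"), ("appstore", "Apple"), ("apple.news", "Apple"),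
  ("apple.com", "Apple"), ("aaplimg", "Apple"), ("push.apple", "Apple"), ("siri", "Apple"),
  ("applemusic", "Apple"), ("icloud-content", "Apple"), ("me.com", "Apple"), ("mac.com", "Apple"),
  ("apple-dns", "Apple"), ("swcdn.apple", "Apple"), ("ls.apple", "Apple"), ("gs.apple", "Apple"),
  ("ess.apple", "Apple"), ("configuration.apple", "Apple"), ("certs.apple", "Apple"), ("valid.apple", "Apple"),
  ("ocsp.apple", "Apple"), ("captive.apple", "Apple"), ("airport.apple", "Apple"), ("facebook", "Meta"),
  ("fbcdn", "Meta"), ("instagram", "Meta"), ("whatsapp", "Meta"), ("fb.com", "Meta"),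
  ("fb.me", "Meta"), ("meta", "Meta"), ("messenger", "Meta"), ("fbsbx", "Meta"),
  ("facebookcorewwwi", "Meta"), ("accountkit", "Meta"), ("oculus", "Meta"), ("workplace", "Meta"),
  ("fbpigeon", "Meta"), ("facebookmail", "Meta"), ("tfbnw", "Meta"), ("fburl", "Meta"),
  ("cdninstagram", "Meta"), ("threads.net", "Meta"), ("ig.me", "Meta"), ("amazon", "Amazon"),
  ("amazonaws", "Amazon"), ("cloudfront", "Amazon"), ("alexa", "Amazon"), ("prime", "Amazon"),
  ("aws", "Amazon"), ("awsstatic", "Amazon"), ("elasticbeanstalk", "Amazon"), ("elasticache", "Amazon"),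
  ("amazonvideo", "Amazon"), ("amazonpay", "Amazon"), ("primevideo", "Amazon"), ("twitch", "Amazon"),
  ("twitchcdn", "Amazon"), ("twitchsvc", "Amazon"), ("audible", "Amazon"), ("goodreads", "Amazon"),
  ("kindle", "Amazon"), ("ring.com", "Amazon"), ("amazon-adsystem", "Amazon"), ("amazonwebservices", "Amazon"),
  ("awscdn", "Amazon"), ("s3.amazonaws", "Amazon"), ("ec2.amazonaws", "Amazon"), ("media-amazon", "Amazon"),
  ("ssl-images-amazon", "Amazon"), ("images-amazon", "Amazon"), ("fls-na.amazon", "Amazon"), ("unagi.amazon", "Amazon"),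
  ("device-metrics-us.amazon", "Amazon"), ("microsoft", "Microsoft"), ("msn", "Microsoft"), ("bing", "Microsoft"),
  ("azure", "Microsoft"), ("office", "Microsoft"), ("live", "Microsoft"), ("outlook", "Microsoft"),
  ("skype", "Microsoft"), ("xbox", "Microsoft"), ("windows", "Microsoft"), ("msftconnecttest", "Microsoft"),
  ("msedge", "Microsoft"), ("microsoftonline", "Microsoft"), ("office365", "Microsoft"), ("sharepoint", "Microsoft"),
  ("onedrive", "Microsoft"), ("onenote", "Microsoft"), ("linkedin", "Microsoft"), ("licdn", "Microsoft"),
  ("github", "Microsoft"), ("githubusercontent", "Microsoft"), ("githubassets", "Microsoft"), ("npmjs", "Microsoft"),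
  ("visualstudio", "Microsoft"), ("vsassets", "Microsoft"), ("azureedge", "Microsoft"), ("trafficmanager", "Microsoft"),
  ("windowsupdate", "Microsoft"), ("msauth", "Microsoft"), ("msftauth", "Microsoft"), ("msftstatic", "Microsoft"),
  ("msecnd", "Microsoft"), ("microsoftstore", "Microsoft"), ("ms-acdc", "Microsoft"), ("sfx.ms", "Microsoft"),
  ("aka.ms", "Microsoft"), ("gfx.ms", "Microsoft"), ("c.bing", "Microsoft"), ("s.bing", "Microsoft"),
  ("login.live", "Microsoft"), ("login.microsoftonline", "Microsoft"), ("teams", "Microsoft"), ("skypeforbusiness", "Microsoft"),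
  ("lync", "Microsoft"), ("yammer", "Microsoft"), ("dynamics", "Microsoft"), ("azure-dns", "Microsoft"),
  ("msocsp", "Microsoft"), ("digicert", "Microsoft"), ("verisign.net", "Microsoft"), ("netflix", "Netflix"),
  ("nflximg", "Netflix"), ("nflxvideo", "Netflix"), ("nflxext", "Netflix"), ("nflxso", "Netflix"),
  ("spotify", "Spotify"), ("scdn", "Spotify"), ("spotifycdn", "Spotify"), ("spotilocal", "Spotify"),
  ("tiktok", "Tiktok"), ("tiktokcdn", "Tiktok"), ("bytedance", "Tiktok"), ("byteoversea", "Tiktok"),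
  ("muscdn", "Tiktok"), ("musical.ly", "Tiktok"), ("twitter", "Twitter/x"), ("twimg", "Twitter/x"),
  ("x.com", "Twitter/x"), ("t.co", "Twitter/x"), ("tweetdeck", "Twitter/x"), ("snapchat", "Snapchat"),
  ("snapkit", "Snapchat"), ("snap.com", "Snapchat"), ("snapads", "Snapchat"), ("adobe", "Adobe"),
  ("typekit", "Adobe"), ("adobecc", "Adobe"), ("behance", "Adobe"), ("adobelogin", "Adobe"),
  ("salesforce", "Salesforce"), ("force.com", "Salesforce"), ("salesforceliveagent", "Salesforce"), ("sfdc", "Salesforce"),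
  ("oracle", "Oracle"), ("oraclecloud", "Oracle"), ("eloqua", "Oracle"), ("bluekai", "Oracle"),
  ("grapeshot", "Oracle"), ("ibm", "Ibm"), ("bluemix", "Ibm"), ("softlayer", "Ibm"),
  ("cloudflare", "Cloudflare"), ("cloudflare-dns", "Cloudflare"), ("cloudflareresolve", "Cloudflare"), ("cf-ipfs", "Cloudflare"),
  ("akamai", "Akamai"), ("akamaized", "Akamai"), ("akamaihd", "Akamai"), ("akadns", "Akamai"),
  ("edgekey", "Akamai"), ("edgesuite", "Akamai")]

-- _LENGTHS = sorted({len(p) for p, _ in _PATTERNS})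
def lengthsB : List Int :=
  PySem.List.sorted (PySem.Set.ofList (patternsB.map (fun pc => PySem.Str.len pc.1))) (fun x => x)

def classify_all_tech_alt (domain : String) : String :=
  let dl := PySem.Str.lower domain
  let subs := lengthsB.foldl
    (fun s L => (PySem.List.pyRange 0 (PySem.Str.len dl)).foldl
      (fun s i => PySem.Set.add s (PySem.Str.slice dl (some i) (some (i + L)))) s)
    PySem.Set.empty
  -- next((label for p, label in _PATTERNS if p in subs), 'Others')
  ((patternsB.find? (fun pc => PySem.Set.contains subs pc.1)).map Prod.snd).getD "Others"

-- ===== PRECONDITION & SPEC =====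
def Spec_classify_all_tech (domain : String) (out : String) : Prop := out = classify_all_tech_alt domain
instance (domain : String) (out : String) : Decidable (Spec_classify_all_tech domain out) := by unfold Spec_classify_all_tech; infer_instance

-- ===== CLAIM (what is proved, stated in full; the proofs are below) =====
def Claim_equal_classify_all_tech : Prop := ∀ (domain : String), Dom_classify_all_tech domain → Spec_classify_all_tech domain (classify_all_tech domain)

-- ===== LEMMAS AND PROOFS =====

-- proof-side reference scan: first pattern (priority order) that is a substring of dl
def optScanIsIn (dl : String) : List (String × String) → Option String
  | [] => none
  | (p, label) :: rest => if PySem.Str.isIn p dl then some label else optScanIsIn dl rest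

-- flatten a dict of pattern lists into (pattern, capitalized label) pairs
def flatOf (dict : List (String × List String)) : List (String × String) :=
  dict.flatMap (fun cp => cp.2.map (fun p => (p, pyCapitalize cp.1)))

lemma scanPatsA_eq (dl c : String) (ps : List String) :
    scanPatsA dl c ps = optScanIsIn dl (ps.map (fun p => (p, pyCapitalize c))) := by
  induction ps with
  | nil => rfl
  | cons p ps ih => simp [scanPatsA, optScanIsIn, ih]

lemma optScanIsIn_append (dl : String) (l1 l2 : List (String × String)) :
    optScanIsIn dl (l1 ++ l2) =
      match optScanIsIn dl l1 with
      | some r => some r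
      | none => optScanIsIn dl l2 := by
  induction l1 with
  | nil => rfl
  | cons pc l1 ih =>
    obtain ⟨p, label⟩ := pc
    simp only [List.cons_append, optScanIsIn]
    by_cases h : PySem.Str.isIn p dl = true
    · rw [if_pos h, if_pos h]
    · rw [if_neg h, if_neg h, ih]

lemma scanDictA_eq (dl : String) (dict : List (String × List String)) :
    scanDictA dl dict = optScanIsIn dl (flatOf dict) := by
  induction dict with
  | nil => rfl
  | cons cp rest ih =>
    obtain ⟨c, ps⟩ := cp
    simp only [scanDictA, flatOf, List.flatMap_cons, optScanIsIn_append, scanPatsA_eq]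
    cases optScanIsIn dl (ps.map (fun p => (p, pyCapitalize c))) <;> simp [ih, flatOf]

-- membership in the inner fold that adds one slice per start position
lemma mem_foldl_add (g : Int → String) (x : String) (is : List Int) (s : PySem.Set String) :
    x ∈ is.foldl (fun s i => PySem.Set.add s (g i)) s ↔ x ∈ s ∨ ∃ i ∈ is, x = g i := by
  induction is generalizing s with
  | nil => simp
  | cons i is ih =>
    simp only [List.foldl_cons, ih, PySem.Set.mem_add, List.mem_cons]
    constructor
    · rintro ((h | h) | ⟨i', hi', h⟩)
      · exact Or.inl h
      · exact Or.inr ⟨i, Or.inl rfl, h⟩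
      · exact Or.inr ⟨i', Or.inr hi', h⟩
    · rintro (h | ⟨i', (rfl | hi'), h⟩)
      · exact Or.inl (Or.inl h)
      · exact Or.inl (Or.inr h)
      · exact Or.inr ⟨i', hi', h⟩

-- membership in the whole substring index (lengths outer, positions inner)
lemma mem_subs (dl : String) (x : String) (ls : List Int) (s : PySem.Set String) :
    x ∈ ls.foldl
      (fun s L => (PySem.List.pyRange 0 (PySem.Str.len dl)).foldl
        (fun s i => PySem.Set.add s (PySem.Str.slice dl (some i) (some (i + L)))) s) s
    ↔ x ∈ s ∨ ∃ L ∈ ls, ∃ i ∈ PySem.List.pyRange 0 (PySem.Str.len dl) 1,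
        x = PySem.Str.slice dl (some i) (some (i + L)) := by
  induction ls generalizing s with
  | nil => simp
  | cons L ls ih =>
    simp only [List.foldl_cons, ih, mem_foldl_add, List.mem_cons]
    constructor
    · rintro ((h | ⟨i, hi, h⟩) | ⟨L', hL', hrest⟩)
      · exact Or.inl h
      · exact Or.inr ⟨L, Or.inl rfl, i, hi, h⟩
      · exact Or.inr ⟨L', Or.inr hL', hrest⟩
    · rintro (h | ⟨L', (rfl | hL'), hrest⟩)
      · exact Or.inl (Or.inl h)
      · exact Or.inl (Or.inr hrest)
      · exact Or.inr ⟨L', hL', hrest⟩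

set_option maxRecDepth 8192 in
lemma lengthsB_val : lengthsB = [3, 4, 5, 6, 7, 8, 9, 10, 11, 12, 13, 14, 15, 16, 17, 19, 21, 24] := by
  decide

set_option maxRecDepth 8192 in
lemma patternsB_fact :
    ∀ pc ∈ patternsB, pc.1.toList ≠ [] ∧
      ((pc.1.toList.length : Int) ∈ ([3, 4, 5, 6, 7, 8, 9, 10, 11, 12, 13, 14, 15, 16, 17, 19, 21, 24] : List Int)) := by
  decide

-- a slice of dl is an infix of dl (forward direction of the key equivalence)
lemma slice_isIn (dl x : String) (i L : Int) (hi : 0 ≤ i) (hL : 0 < L)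
    (hx : x = PySem.Str.slice dl (some i) (some (i + L))) : PySem.Str.isIn x dl = true := by
  subst hx
  rw [PySem.Str.isIn_eq, PySem.Chars.isIn_iff_infix, PySem.Str.toList_slice]
  show PySem.List.slice dl.toList (some i) (some (i + L)) <:+: dl.toList
  rw [PySem.List.slice_toNat dl.toList hi (by omega)]
  exact ((List.take_prefix _ _).isInfix.trans (List.drop_suffix _ _).isInfix)

-- key equivalence: for a nonempty pattern whose length is indexed, set lookup = substring test
lemma contains_eq_isIn (dl p : String) (hp : p.toList ≠ [])
    (hlen : (p.toList.length : Int) ∈ lengthsB) :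
    PySem.Set.contains
      (lengthsB.foldl
        (fun s L => (PySem.List.pyRange 0 (PySem.Str.len dl)).foldl
          (fun s i => PySem.Set.add s (PySem.Str.slice dl (some i) (some (i + L)))) s)
        PySem.Set.empty) p
      = PySem.Str.isIn p dl := by
  have hpos : ∀ L ∈ lengthsB, 0 < L := by rw [lengthsB_val]; decide
  cases h : PySem.Str.isIn p dl with
  | false =>
    rw [Bool.eq_false_iff]
    intro hc
    rw [PySem.Set.contains_iff] at hc
    rw [mem_subs] at hc
    rcases hc with h0 | ⟨L, hL, i, hi, hx⟩
    · simp [PySem.Set.empty] at h0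
    · rw [PySem.List.mem_pyRange_one] at hi
      have := slice_isIn dl p i L hi.1 (hpos L hL) hx
      rw [h] at this; exact absurd this (by simp)
  | true =>
    rw [PySem.Set.contains_iff, mem_subs]
    right
    rw [PySem.Str.isIn_eq, PySem.Chars.isIn_iff_infix] at h
    obtain ⟨s, t, hst⟩ := h
    have hplen : 0 < p.toList.length := List.length_pos_iff.mpr hp
    refine ⟨(p.toList.length : Int), hlen, (s.length : Int), ?_, ?_⟩
    · rw [PySem.List.mem_pyRange_one]
      constructor
      · positivity
      · have : dl.toList.length = s.length + p.toList.length + t.length := by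
          rw [← hst]; simp; omega
        have : s.length < dl.toList.length := by omega
        simp only [PySem.Str.len_eq]
        exact_mod_cast this
    · apply (String.toList_inj).mp
      rw [PySem.Str.toList_slice]
      show p.toList = PySem.List.slice dl.toList _ _
      rw [PySem.List.slice_toNat dl.toList (by positivity) (by positivity)]
      have h1 : ((s.length : Int)).toNat = s.length := by simp
      have h2 : ((s.length : Int) + (p.toList.length : Int)).toNat = s.length + p.toList.length := by
        omega
      rw [h1, h2, ← hst, List.append_assoc, List.drop_left]
      have h3 : s.length + p.toList.length - s.length = p.toList.length := by omega
      rw [h3, List.take_left]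

-- with the key equivalence, B's find?-scan computes the reference scan
lemma findB_eq (dl : String) (subs : PySem.Set String) (l : List (String × String))
    (h : ∀ pc ∈ l, PySem.Set.contains subs pc.1 = PySem.Str.isIn pc.1 dl) :
    ((l.find? (fun pc => PySem.Set.contains subs pc.1)).map Prod.snd).getD "Others"
      = (optScanIsIn dl l).getD "Others" := by
  induction l with
  | nil => rfl
  | cons pc rest ih =>
    obtain ⟨p, label⟩ := pc
    have hp : subs.contains (p, label).1 = PySem.Chars.isIn p.toList dl.toList := by
      have hh := h (p, label) (List.mem_cons_self ..)
      rwa [PySem.Str.isIn_eq] at hh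
    cases hc : subs.contains (p, label).1 with
    | true =>
      have hin : PySem.Chars.isIn p.toList dl.toList = true := by rw [← hp]; exact hc
      rw [List.find?_cons_of_pos (p := fun (pc : String × String) => subs.contains pc.1) (a := (p, label)) (l := rest) hc]
      simp [optScanIsIn, hin]
    | false =>
      have hin : PySem.Chars.isIn p.toList dl.toList = false := by rw [← hp]; exact hc
      rw [List.find?_cons_of_neg (p := fun (pc : String × String) => subs.contains pc.1) (a := (p, label)) (l := rest)
        (by show ¬ subs.contains (p, label).1 = true; rw [hc]; simp)]
      rw [ih (fun pc hpc => h pc (List.mem_cons_of_mem _ hpc))]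
      simp [optScanIsIn, hin]

set_option maxRecDepth 1000000 in
lemma patternsB_flat : patternsB = flatOf gafamDomains ++ flatOf otherTechCompanies := by
  simp only [flatOf, gafamDomains, otherTechCompanies, List.flatMap_cons, List.flatMap_nil,
    List.map_cons, List.map_nil, List.append_nil, List.cons_append, List.nil_append, patternsB]
  decide

-- ===== VERDICT (by name: the statement is the Claim_ definition above) =====
set_option maxRecDepth 1000000 in
theorem classify_all_tech_spec : Claim_equal_classify_all_tech := by
  intro domain _
  unfold Spec_classify_all_tech
  by_cases hd : domain = ""
  · subst hd
    decide
  · unfold classify_all_tech classify_all_tech_alt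
    simp only [if_neg hd]
    set dl := PySem.Str.lower domain with hdl
    have hkey : ∀ pc ∈ patternsB,
        PySem.Set.contains
          (lengthsB.foldl
            (fun s L => (PySem.List.pyRange 0 (PySem.Str.len dl)).foldl
              (fun s i => PySem.Set.add s (PySem.Str.slice dl (some i) (some (i + L)))) s)
            PySem.Set.empty) pc.1 = PySem.Str.isIn pc.1 dl := by
      intro pc hpc
      obtain ⟨hne, hlen⟩ := patternsB_fact pc hpc
      exact contains_eq_isIn dl pc.1 hne (by rw [lengthsB_val]; exact_mod_cast hlen)
    rw [findB_eq dl _ patternsB hkey]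
    rw [scanDictA_eq, scanDictA_eq, patternsB_flat, optScanIsIn_append]
    cases optScanIsIn dl (flatOf gafamDomains) <;>
      cases optScanIsIn dl (flatOf otherTechCompanies) <;> simp
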